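-- pv_equiv track=rewrite | github.com/prasanth-ashokan/My-Programs | cf/oc19 lo/xor.py | sovi
-- ===== SOURCE A (Python) =====
-- def sovi(k):
--             n=12
--             l=[5665,54,67,7787,6478,54,67,78,3,8,1,6]
--
--
--             q=((k//n)%3)
--             r=k%n
--             if q==0:
--                 for j in range(r):
--                     d1=j%n
--                     a=(l[d1])
--                     d2=n-(j%n)-1
--                     b=(l[d2])
--                     l[d1]=(a^b)
--                 if (n%2)!=0:
--                     if k>n//2:
--                         l[n//2]=0
--                 s=''
--                 for i in l:
--                     s+=str(i)+' '
--                 return s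
--             elif q==1:
--                 for j in range(n):
--                     d1=j%n
--                     a=(l[d1])
--                     d2=n-(j%n)-1
--                     b=(l[d2])
--                     l[d1]=(a^b)
--                 for j in range(r):
--                     d1=j%n
--                     a=(l[d1])
--                     d2=n-(j%n)-1
--                     b=(l[d2])
--                     l[d1]=(a^b)
--                 s=''
--                 for i in l:
--                     s+=str(i)+' '
--                 return s
--             elif q==2:
--                 for j in range(n):
--                     d1=j%n
--                     a=int(l[d1])
--                     d2=n-(j%n)-1
--                     b=int(l[d2])
--                     l[d1]=int(a^b)
--                 for j in range(n):
--                     d1=j%n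
--                     a=int(l[d1])
--                     d2=n-(j%n)-1
--                     b=int(l[d2])
--                     l[d1]=int(a^b)
--                 for j in range(r):
--                     d1=j%n
--                     a=(l[d1])
--                     d2=n-(j%n)-1
--                     b=(l[d2])
--                     l[d1]=(a^b)
--                 s=''
--                 for i in l:
--                     s+=str(i)+' '
--                 return s
-- ===== SOURCE B (Python) =====
-- def sovi(k):
--     base = [5665, 54, 67, 7787, 6478, 54, 67, 78, 3, 8, 1, 6]
--     q = (k // 12) % 3
--     r = k % 12
--     out = [0] * 12
--     for p in range(6):
--         a, b = base[p], base[11 - p]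
--         # one full 12-step pass maps the pair (a,b) to (a^b, a); this map has period 3
--         if q == 1:
--             a, b = a ^ b, a
--         elif q == 2:
--             a, b = b, a ^ b
--         # the r leftover steps touch pair p iff p < r (updates a) and iff 11-p < r (then updates b)
--         if p < r:
--             a ^= b
--         if 11 - p < r:
--             b ^= a
--         out[p], out[11 - p] = a, b
--     return ''.join(str(x) + ' ' for x in out)
-- ===== Notes on version B (the rewrite author's own statement) =====
-- stated objective: alternative
-- what changed: Instead of simulating the XOR steps, B uses the algebraic structure: one full 12-step pass acts on each pair (l[p], l[11-p]) independently as (a,b)->(a^b,a), a map of period 3, so B computes each pair's final value in closed form from q=(k//12)%3 and the r=k%12 leftover steps, with no step-by-step simulation.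
import Mathlib
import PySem

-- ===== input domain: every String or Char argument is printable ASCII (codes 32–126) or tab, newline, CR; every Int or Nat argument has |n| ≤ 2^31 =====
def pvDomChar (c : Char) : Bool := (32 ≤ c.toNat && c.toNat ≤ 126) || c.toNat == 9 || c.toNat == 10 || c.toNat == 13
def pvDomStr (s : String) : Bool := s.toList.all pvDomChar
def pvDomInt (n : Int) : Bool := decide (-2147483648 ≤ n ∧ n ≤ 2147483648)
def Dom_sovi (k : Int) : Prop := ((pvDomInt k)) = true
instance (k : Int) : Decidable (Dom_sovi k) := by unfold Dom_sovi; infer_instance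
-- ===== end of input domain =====

-- B replaces A's step-by-step XOR simulation by a pairwise closed form: a full 12-step pass
-- maps each pair (l[p], l[11-p]) to (a^b, a) (period 3), so each pair is computed directly.

-- ===== PORT A =====
-- the shared loop body of all of A's for-loops: l[d1] = l[d1] ^ l[n-(j%n)-1]
def soviStep (l : List Int) (j : Int) : List Int :=
  let d1 := PySem.Int.mod j 12
  let a := PySem.List.pyGetD l d1 0
  let d2 := 12 - PySem.Int.mod j 12 - 1
  let b := PySem.List.pyGetD l d2 0
  PySem.List.pySetD l d1 (PySem.Int.bxor a b)

-- s = ''; for i in l: s += str(i) + ' '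
def soviOut (l : List Int) : String :=
  l.foldl (fun s i => s ++ (PySem.Int.toStr i ++ " ")) ""

def sovi (k : Int) : String :=
  let n : Int := 12
  let l0 : List Int := [5665, 54, 67, 7787, 6478, 54, 67, 78, 3, 8, 1, 6]
  let q := PySem.Int.mod (PySem.Int.floordiv k n) 3
  let r := PySem.Int.mod k n
  if q = 0 then
    let l := (PySem.List.pyRange 0 r 1).foldl soviStep l0
    let l := if PySem.Int.mod n 2 ≠ 0 then
               (if k > PySem.Int.floordiv n 2 then
                  PySem.List.pySetD l (PySem.Int.floordiv n 2) 0 else l)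
             else l
    soviOut l
  else if q = 1 then
    let l := (PySem.List.pyRange 0 n 1).foldl soviStep l0
    let l := (PySem.List.pyRange 0 r 1).foldl soviStep l
    soviOut l
  else
    let l := (PySem.List.pyRange 0 n 1).foldl soviStep l0
    let l := (PySem.List.pyRange 0 n 1).foldl soviStep l
    let l := (PySem.List.pyRange 0 r 1).foldl soviStep l
    soviOut l

-- ===== PORT B =====
-- body of B's loop over pairs p = 0..5: closed form for the pair (base[p], base[11-p])
def soviPair (q r : Int) (base : List Int) (out : List Int) (p : Int) : List Int :=
  let a := PySem.List.pyGetD base p 0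
  let b := PySem.List.pyGetD base (11 - p) 0
  let (a, b) :=
    if q = 1 then (PySem.Int.bxor a b, a)
    else if q = 2 then (b, PySem.Int.bxor a b)
    else (a, b)
  let a := if p < r then PySem.Int.bxor a b else a
  let b := if 11 - p < r then PySem.Int.bxor b a else b
  PySem.List.pySetD (PySem.List.pySetD out p a) (11 - p) b

def sovi_alt (k : Int) : String :=
  let base : List Int := [5665, 54, 67, 7787, 6478, 54, 67, 78, 3, 8, 1, 6]
  let q := PySem.Int.mod (PySem.Int.floordiv k 12) 3
  let r := PySem.Int.mod k 12
  let out := (PySem.List.pyRange 0 6 1).foldl (soviPair q r base)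
               [0, 0, 0, 0, 0, 0, 0, 0, 0, 0, 0, 0]
  PySem.Str.join "" (out.map (fun x => PySem.Int.toStr x ++ " "))

-- ===== PRECONDITION & SPEC =====
def Spec_sovi (k : Int) (out : String) : Prop := out = sovi_alt k
instance (k : Int) (out : String) : Decidable (Spec_sovi k out) := by unfold Spec_sovi; infer_instance

-- ===== CLAIM =====
def Claim_equal_sovi : Prop := ∀ (k : Int), Dom_sovi k → Spec_sovi k (sovi k)

-- ===== LEMMAS AND PROOFS =====

-- A's result as a function of q = (k//12)%3 and r = k%12 (k itself only feeds the dead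
-- n%2≠0 branch, which vanishes since 12 is even)
def soviQR (q r : Int) : String :=
  let n : Int := 12
  let l0 : List Int := [5665, 54, 67, 7787, 6478, 54, 67, 78, 3, 8, 1, 6]
  if q = 0 then
    soviOut ((PySem.List.pyRange 0 r 1).foldl soviStep l0)
  else if q = 1 then
    soviOut ((PySem.List.pyRange 0 r 1).foldl soviStep
      ((PySem.List.pyRange 0 n 1).foldl soviStep l0))
  else
    soviOut ((PySem.List.pyRange 0 r 1).foldl soviStep
      ((PySem.List.pyRange 0 n 1).foldl soviStep
        ((PySem.List.pyRange 0 n 1).foldl soviStep l0)))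

-- B's result as a function of the same q, r
def soviBQR (q r : Int) : String :=
  let base : List Int := [5665, 54, 67, 7787, 6478, 54, 67, 78, 3, 8, 1, 6]
  let out := (PySem.List.pyRange 0 6 1).foldl (soviPair q r base)
               [0, 0, 0, 0, 0, 0, 0, 0, 0, 0, 0, 0]
  PySem.Str.join "" (out.map (fun x => PySem.Int.toStr x ++ " "))

theorem sovi_eq_QR (k : Int) :
    sovi k = soviQR (PySem.Int.mod (PySem.Int.floordiv k 12) 3) (PySem.Int.mod k 12) := by
  simp only [sovi, soviQR]
  norm_num

theorem sovi_alt_eq_BQR (k : Int) :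
    sovi_alt k = soviBQR (PySem.Int.mod (PySem.Int.floordiv k 12) 3) (PySem.Int.mod k 12) := rfl

theorem qr_agree (q r : Int) (hq0 : 0 ≤ q) (hq : q < 3) (hr0 : 0 ≤ r) (hr : r < 12) :
    soviQR q r = soviBQR q r := by
  interval_cases q <;> interval_cases r <;> decide

theorem sovi_spec' (k : Int) : sovi k = sovi_alt k := by
  rw [sovi_eq_QR, sovi_alt_eq_BQR]
  have h3 : PySem.Int.mod (PySem.Int.floordiv k 12) 3 = (PySem.Int.floordiv k 12) % 3 :=
    PySem.Int.mod_eq_emod_of_pos (by norm_num)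
  have h12 : PySem.Int.mod k 12 = k % 12 :=
    PySem.Int.mod_eq_emod_of_pos (by norm_num)
  exact qr_agree _ _ (by rw [h3]; exact Int.emod_nonneg _ (by norm_num))
    (by rw [h3]; omega) (by rw [h12]; exact Int.emod_nonneg _ (by norm_num))
    (by rw [h12]; omega)

-- ===== VERDICT =====
theorem sovi_spec : Claim_equal_sovi := by
  intro k _
  unfold Spec_sovi
  exact sovi_spec' k
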